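-- pv_equiv track=rewrite | github.com/cargillb/Capstone | starter_website/webapp.py | complex_password
-- ===== SOURCE A (Python) =====
-- def complex_password(password):
--
--     if len(password) >= 8 and \
--             any(char.isdigit() for char in password) and \
--             any(char.islower() for char in password) and \
--             any(char.isupper() for char in password) and \
--             any(char.islower() for char in password) and \
--             any(not char.isalnum() for char in password):
--         return True
--     else:
--         return False
-- ===== SOURCE B (Python) =====
-- def complex_password(password):
--     has_digit = has_lower = has_upper = has_special = False
--     for char in password:
--         if char.isdigit():
--             has_digit = True
--         if char.islower():
--             has_lower = True
--         if char.isupper():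
--             has_upper = True
--         if not char.isalnum():
--             has_special = True
--     return len(password) >= 8 and has_digit and has_lower and has_upper and has_special
-- ===== Notes on version B (the rewrite author's own statement) =====
-- stated objective: simpler
-- what changed: Replaces five separate any() passes over the string (including a redundant duplicate islower pass) and the if/else wrapper with a single for-loop that sets four boolean flags and returns one combined boolean expression.
import Mathlib
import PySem

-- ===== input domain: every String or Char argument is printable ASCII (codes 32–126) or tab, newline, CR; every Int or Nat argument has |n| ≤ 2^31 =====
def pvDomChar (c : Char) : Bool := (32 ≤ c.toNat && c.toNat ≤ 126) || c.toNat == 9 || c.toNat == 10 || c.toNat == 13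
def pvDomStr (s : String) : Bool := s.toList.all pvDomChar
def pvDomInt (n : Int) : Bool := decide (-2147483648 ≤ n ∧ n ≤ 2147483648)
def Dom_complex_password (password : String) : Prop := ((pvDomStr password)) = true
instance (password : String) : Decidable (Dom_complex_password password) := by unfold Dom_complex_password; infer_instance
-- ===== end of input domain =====

-- B replaces A's five any() passes (one duplicated) and if/else with one flag-setting loop: simpler.

-- ===== PORT A =====
def complex_password (password : String) : Bool :=
  if decide (8 ≤ PySem.Str.len password)
      && password.toList.any (fun c => PySem.Chars.isdigit c)
      && password.toList.any (fun c => PySem.Chars.islower c)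
      && password.toList.any (fun c => PySem.Chars.isupper c)
      && password.toList.any (fun c => PySem.Chars.islower c)
      && password.toList.any (fun c => !PySem.Chars.isalnum c)
  then true else false

-- ===== PORT B =====
def cpFlags (cs : List Char) (d l u s : Bool) : Bool × Bool × Bool × Bool :=
  match cs with
  | [] => (d, l, u, s)
  | c :: rest =>
      cpFlags rest
        (if PySem.Chars.isdigit c then true else d)
        (if PySem.Chars.islower c then true else l)
        (if PySem.Chars.isupper c then true else u)
        (if !PySem.Chars.isalnum c then true else s)

def complex_password_alt (password : String) : Bool :=
  let f := cpFlags password.toList false false false false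
  decide (8 ≤ PySem.Str.len password) && f.1 && f.2.1 && f.2.2.1 && f.2.2.2

-- ===== PRECONDITION & SPEC =====
def Spec_complex_password (password : String) (out : Bool) : Prop := out = complex_password_alt password
instance (password : String) (out : Bool) : Decidable (Spec_complex_password password out) := by unfold Spec_complex_password; infer_instance

-- ===== CLAIM (what is proved, stated in full; the proofs are below) =====
def Claim_equal_complex_password : Prop := ∀ (password : String), Dom_complex_password password → Spec_complex_password password (complex_password password)

-- ===== LEMMAS AND PROOFS =====
theorem cpFlags_eq (cs : List Char) (d l u s : Bool) :
    cpFlags cs d l u s =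
      (d || cs.any (fun c => PySem.Chars.isdigit c),
       l || cs.any (fun c => PySem.Chars.islower c),
       u || cs.any (fun c => PySem.Chars.isupper c),
       s || cs.any (fun c => !PySem.Chars.isalnum c)) := by
  induction cs generalizing d l u s with
  | nil => simp [cpFlags]
  | cons c rest ih =>
      simp only [cpFlags, ih, List.any_cons]
      split_ifs <;> simp_all

-- ===== VERDICT (by name: the statement is the Claim_ definition above) =====
theorem complex_password_spec : Claim_equal_complex_password := by
  intro password _
  unfold Spec_complex_password complex_password complex_password_alt
  simp only [cpFlags_eq, Bool.false_or]
  cases h0 : decide (8 ≤ PySem.Str.len password) <;>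
    cases h1 : password.toList.any (fun c => PySem.Chars.isdigit c) <;>
      cases h2 : password.toList.any (fun c => PySem.Chars.islower c) <;>
        cases h3 : password.toList.any (fun c => PySem.Chars.isupper c) <;>
          cases h4 : password.toList.any (fun c => !PySem.Chars.isalnum c) <;>
            simp
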